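-- pv_equiv track=rewrite | github.com/kamojiro/atcoderall | grand/047/A.py | fact2
-- ===== SOURCE A (Python) =====
-- def fact2(a, b):
--     c2 = 0
--     c5 = 0
--     while a%2 == 0:
--         a //= 2
--         c2 += 1
--     while a%5 == 0:
--         a //= 5
--         c5 += 1
--     return min(c2-b, 9), min(c5-b,9)
-- ===== SOURCE B (Python) =====
-- def fact2(a, b):
--     c2 = (a & -a).bit_length() - 1
--     c5 = 0
--     while a % 5 == 0:
--         a //= 5
--         c5 += 1
--     return min(c2 - b, 9), min(c5 - b, 9)
-- ===== Notes on version B (the rewrite author's own statement) =====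
-- stated objective: alternative
-- what changed: The factor-of-2 loop is replaced by the closed-form trailing-zero-bit trick (a & -a).bit_length() - 1, and the 5s are counted on the original a (valid since powers of 2 and 5 are coprime), so only one loop remains. Pre_ excludes a == 0, where A (and B) loop forever.
import Mathlib
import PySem

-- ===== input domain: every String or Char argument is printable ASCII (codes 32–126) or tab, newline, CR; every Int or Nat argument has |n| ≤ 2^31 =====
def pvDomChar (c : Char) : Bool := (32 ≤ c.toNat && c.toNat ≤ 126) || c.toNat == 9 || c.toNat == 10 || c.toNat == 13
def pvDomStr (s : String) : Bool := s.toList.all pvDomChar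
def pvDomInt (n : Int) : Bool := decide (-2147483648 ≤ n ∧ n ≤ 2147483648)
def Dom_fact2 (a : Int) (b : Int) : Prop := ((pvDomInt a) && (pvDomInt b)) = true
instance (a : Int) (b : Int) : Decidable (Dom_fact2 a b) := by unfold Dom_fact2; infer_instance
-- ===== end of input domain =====

-- B replaces the factor-of-2 loop by the trailing-zero bit trick (a & -a).bit_length() - 1
-- and counts the 5s on the original a; same return value for every a ≠ 0 (at a = 0 both loop forever).

-- ===== PORT A =====
-- `while a % 2 == 0: a //= 2; c += 1`.  The fuel argument is a totality guard only: for a ≠ 0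
-- the loop runs at most log2 |a| < |a| times, so fuel = |a| never runs out (proved below);
-- at a = 0 the Python loop never terminates, and a = 0 is excluded by Pre_.
def fact2Loop2 : Nat → Int → Int → Int × Int
  | 0, a, c => (a, c)
  | fuel + 1, a, c =>
      if PySem.Int.mod a 2 = 0 then fact2Loop2 fuel (PySem.Int.floordiv a 2) (c + 1) else (a, c)

-- `while a % 5 == 0: a //= 5; c += 1`  (same fuel guard)
def fact2Loop5 : Nat → Int → Int → Int × Int
  | 0, a, c => (a, c)
  | fuel + 1, a, c =>
      if PySem.Int.mod a 5 = 0 then fact2Loop5 fuel (PySem.Int.floordiv a 5) (c + 1) else (a, c)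

def fact2 (a : Int) (b : Int) : Int × Int :=
  let p2 := fact2Loop2 a.natAbs a 0
  let p5 := fact2Loop5 p2.1.natAbs p2.1 0
  (min (p2.2 - b) 9, min (p5.2 - b) 9)

-- ===== PORT B =====
-- B's 5-loop, run on the original a (same fuel totality guard as above)
def fact2AltLoop5 : Nat → Int → Int → Int × Int
  | 0, a, c => (a, c)
  | fuel + 1, a, c =>
      if PySem.Int.mod a 5 = 0 then fact2AltLoop5 fuel (PySem.Int.floordiv a 5) (c + 1) else (a, c)

def fact2_alt (a : Int) (b : Int) : Int × Int :=
  let c2 : Int := (PySem.Int.bitLength (PySem.Int.band a (-a)) : Int) - 1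
  let p5 := fact2AltLoop5 a.natAbs a 0
  (min (c2 - b) 9, min (p5.2 - b) 9)

-- ===== PRECONDITION & SPEC =====
-- Pre_ excludes exactly a = 0, where the Python A loops forever (B does too).
def Pre_fact2 (a : Int) (b : Int) : Prop := a ≠ 0
instance (a : Int) (b : Int) : Decidable (Pre_fact2 a b) := by unfold Pre_fact2; infer_instance
def pvWitness_fact2 : Int × Int := (12, 3)

def Spec_fact2 (a : Int) (b : Int) (out : Int × Int) : Prop := out = fact2_alt a b
instance (a : Int) (b : Int) (out : Int × Int) : Decidable (Spec_fact2 a b out) := by unfold Spec_fact2; infer_instance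

-- ===== CLAIM (what is proved, stated in full; the proofs are below) =====
def Claim_equal_fact2 : Prop := ∀ (a : Int) (b : Int), Dom_fact2 a b → Pre_fact2 a b → Spec_fact2 a b (fact2 a b)

-- ===== LEMMAS AND PROOFS =====

-- bitwise helpers on Nat
lemma land_self_nat (a : Nat) : a &&& a = a := by
  apply Nat.eq_of_testBit_eq
  intro i
  rw [Nat.testBit_land, Bool.and_self]

lemma land_two_mul_add_one_two_mul (a b : Nat) : (2 * a + 1) &&& (2 * b) = 2 * (a &&& b) := by
  apply Nat.eq_of_testBit_eq
  intro i
  cases i with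
  | zero =>
      rw [Nat.testBit_land]
      simp only [Nat.testBit_zero]
      have e1 : (2 * a + 1) % 2 = 1 := by omega
      have e2 : (2 * b) % 2 = 0 := by omega
      have e3 : (2 * (a &&& b)) % 2 = 0 := by omega
      simp [e1, e2, e3]
  | succ i =>
      rw [Nat.testBit_land]
      simp only [Nat.testBit_add_one]
      have h1 : (2 * a + 1) / 2 = a := by omega
      have h2 : (2 * b) / 2 = b := by omega
      have h3 : (2 * (a &&& b)) / 2 = a &&& b := by omega
      rw [h1, h2, h3, Nat.testBit_land]

lemma land_two_mul_two_mul_add_one (a b : Nat) : (2 * a) &&& (2 * b + 1) = 2 * (a &&& b) := by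
  rw [Nat.land_comm, land_two_mul_add_one_two_mul, Nat.land_comm]

-- lowbit: for m = 2^v * q with q odd, m &&& (m-1) clears the lowest set bit
lemma land_pred (v : Nat) (q : Nat) (hq : q % 2 = 1) :
    (2 ^ v * q) &&& (2 ^ v * q - 1) = 2 ^ v * q - 2 ^ v := by
  induction v with
  | zero =>
      obtain ⟨t, ht⟩ : ∃ t, q = 2 * t + 1 := ⟨q / 2, by omega⟩
      subst ht
      have : 2 * t + 1 - 1 = 2 * t := by omega
      rw [pow_zero, one_mul, this, land_two_mul_add_one_two_mul, land_self_nat]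
  | succ v ih =>
      have hpos : 1 ≤ 2 ^ v * q := Nat.one_le_iff_ne_zero.mpr (Nat.mul_ne_zero (by positivity) (by omega))
      have h1 : 2 ^ (v + 1) * q = 2 * (2 ^ v * q) := by ring
      have h2 : 2 * (2 ^ v * q) - 1 = 2 * (2 ^ v * q - 1) + 1 := by omega
      rw [h1, h2, land_two_mul_two_mul_add_one, ih]
      have h3 : 2 ^ v ≤ 2 ^ v * q := Nat.le_mul_of_pos_right _ (show 0 < q by omega)
      rw [pow_succ]
      omega

-- PySem.Int.band a (-a) computed through natAbs
lemma band_neg_self (a : Int) (ha : a ≠ 0) :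
    PySem.Int.band a (-a) = ((a.natAbs - (a.natAbs &&& (a.natAbs - 1)) : Nat) : Int) := by
  unfold PySem.Int.band
  rcases lt_or_gt_of_ne ha with h | h
  · have h1 : ¬ 0 ≤ a := by omega
    have h2 : 0 ≤ -a := by omega
    simp only [h1, h2, if_true, if_false]
    have e1 : (-a).toNat = a.natAbs := by omega
    have e2 : (-a - 1).toNat = a.natAbs - 1 := by omega
    rw [e1, e2]
  · have h1 : 0 ≤ a := by omega
    have h2 : ¬ 0 ≤ -a := by omega
    simp only [h1, h2, if_true, if_false]
    have e1 : a.toNat = a.natAbs := by omega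
    have e2 : (- -a - 1).toNat = a.natAbs - 1 := by omega
    rw [e1, e2]

lemma band_lowbit (a : Int) (v : Nat) (q : Int) (hq : ¬ (2 ∣ q)) (hav : a = 2 ^ v * q) :
    PySem.Int.band a (-a) = ((2 ^ v : Nat) : Int) := by
  have hq0 : q ≠ 0 := by rintro rfl; exact hq (dvd_zero 2)
  have ha : a ≠ 0 := by rw [hav]; exact mul_ne_zero (by positivity) hq0
  rw [band_neg_self a ha]
  have hqodd : q.natAbs % 2 = 1 := by
    rcases Nat.mod_two_eq_zero_or_one q.natAbs with h | h
    · exfalso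
      apply hq
      rw [← Int.natAbs_dvd_natAbs]
      exact Nat.dvd_of_mod_eq_zero h
    · exact h
  have hna : a.natAbs = 2 ^ v * q.natAbs := by
    rw [hav, Int.natAbs_mul, Int.natAbs_pow]; rfl
  have h3 : 2 ^ v ≤ 2 ^ v * q.natAbs := Nat.le_mul_of_pos_right _ (show 0 < q.natAbs by omega)
  have hgen : ∀ k m : Nat, m ≤ k → k - (k - m) = m := by intro k m hkm; omega
  have h4 : 2 ^ v * q.natAbs - (2 ^ v * q.natAbs - 2 ^ v) = 2 ^ v := hgen _ _ h3
  rw [hna, land_pred v q.natAbs hqodd, h4]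

-- bitLength of an exact power of two
lemma bitLength_two_pow (v : Nat) : PySem.Int.bitLength ((2 ^ v : Nat) : Int) = v + 1 := by
  set n : Int := ((2 ^ v : Nat) : Int) with hn
  have hne : n ≠ 0 := by positivity
  have hub : n.natAbs < 2 ^ PySem.Int.bitLength n := PySem.Int.lt_two_pow_bitLength n
  have hlb : 2 ^ (PySem.Int.bitLength n - 1) ≤ n.natAbs := PySem.Int.two_pow_bitLength_le n hne
  have hna : n.natAbs = 2 ^ v := by simp [hn]
  rw [hna] at hub hlb
  have h1 : v < PySem.Int.bitLength n := (Nat.pow_lt_pow_iff_right (by omega)).mp hub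
  have h2 : PySem.Int.bitLength n - 1 ≤ v := (Nat.pow_le_pow_iff_right (by omega)).mp hlb
  omega

-- the loops on an input in factored form (fuel ≥ exponent suffices)
lemma loop2_pow : ∀ (fuel v : Nat) (q c : Int), ¬ (2 ∣ q) → v ≤ fuel →
    fact2Loop2 fuel (2 ^ v * q) c = (q, c + v) := by
  intro fuel
  induction fuel with
  | zero =>
      intro v q c hq hv
      have hv0 : v = 0 := by omega
      subst hv0
      rw [fact2Loop2]
      simp
  | succ fuel ih =>
      intro v q c hq hv
      cases v with
      | zero =>
          have hm : PySem.Int.mod (2 ^ 0 * q) 2 ≠ 0 := fun h =>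
            hq (by simpa using (PySem.Int.mod_eq_zero_iff_dvd _ 2).mp h)
          rw [fact2Loop2, if_neg hm]
          simp
      | succ v =>
          have hmod : PySem.Int.mod (2 ^ (v + 1) * q) 2 = 0 :=
            (PySem.Int.mod_eq_zero_iff_dvd _ 2).mpr ⟨2 ^ v * q, by ring⟩
          rw [fact2Loop2, if_pos hmod]
          have hdiv : PySem.Int.floordiv (2 ^ (v + 1) * q) 2 = 2 ^ v * q := by
            rw [PySem.Int.floordiv_eq_ediv_of_pos (by omega)]
            have e : (2 : Int) ^ (v + 1) * q = 2 * (2 ^ v * q) := by ring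
            rw [e, Int.mul_ediv_cancel_left _ (by omega)]
          rw [hdiv, ih v q (c + 1) hq (by omega)]
          simp only [Prod.mk.injEq, true_and]
          push_cast
          ring

lemma loop5_pow : ∀ (fuel w : Nat) (q c : Int), ¬ (5 ∣ q) → w ≤ fuel →
    fact2Loop5 fuel (5 ^ w * q) c = (q, c + w) := by
  intro fuel
  induction fuel with
  | zero =>
      intro w q c hq hw
      have hw0 : w = 0 := by omega
      subst hw0
      rw [fact2Loop5]
      simp
  | succ fuel ih =>
      intro w q c hq hw
      cases w with
      | zero =>
          have hm : PySem.Int.mod (5 ^ 0 * q) 5 ≠ 0 := fun h =>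
            hq (by simpa using (PySem.Int.mod_eq_zero_iff_dvd _ 5).mp h)
          rw [fact2Loop5, if_neg hm]
          simp
      | succ w =>
          have hmod : PySem.Int.mod (5 ^ (w + 1) * q) 5 = 0 :=
            (PySem.Int.mod_eq_zero_iff_dvd _ 5).mpr ⟨5 ^ w * q, by ring⟩
          rw [fact2Loop5, if_pos hmod]
          have hdiv : PySem.Int.floordiv (5 ^ (w + 1) * q) 5 = 5 ^ w * q := by
            rw [PySem.Int.floordiv_eq_ediv_of_pos (by omega)]
            have e : (5 : Int) ^ (w + 1) * q = 5 * (5 ^ w * q) := by ring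
            rw [e, Int.mul_ediv_cancel_left _ (by omega)]
          rw [hdiv, ih w q (c + 1) hq (by omega)]
          simp only [Prod.mk.injEq, true_and]
          push_cast
          ring

-- B's 5-loop is the same recursion as A's 5-loop
lemma altLoop5_eq : ∀ (fuel : Nat) (a c : Int), fact2AltLoop5 fuel a c = fact2Loop5 fuel a c := by
  intro fuel
  induction fuel with
  | zero => intro a c; rfl
  | succ fuel ih =>
      intro a c
      rw [fact2AltLoop5, fact2Loop5]
      by_cases h : PySem.Int.mod a 5 = 0
      · rw [if_pos h, if_pos h, ih]
      · rw [if_neg h, if_neg h]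

-- every nonzero integer factors as 2^v * 5^w * u with u coprime to 10
lemma decomp (n : Nat) : ∀ (a : Int), a.natAbs ≤ n → a ≠ 0 →
    ∃ (v w : Nat) (u : Int), ¬ (2 ∣ u) ∧ ¬ (5 ∣ u) ∧ a = 2 ^ v * 5 ^ w * u := by
  induction n with
  | zero => intro a h ha; exact absurd (by omega : a = 0) ha
  | succ n ih =>
      intro a h ha
      by_cases h2 : (2 : Int) ∣ a
      · obtain ⟨k, hk⟩ := h2
        have hk0 : k ≠ 0 := by rintro rfl; simp at hk; exact ha hk
        have hle : k.natAbs ≤ n := by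
          have : a.natAbs = 2 * k.natAbs := by rw [hk, Int.natAbs_mul]; rfl
          have : 1 ≤ k.natAbs := by omega
          omega
        obtain ⟨v, w, u, hu2, hu5, heq⟩ := ih k hle hk0
        exact ⟨v + 1, w, u, hu2, hu5, by rw [hk, heq]; ring⟩
      · by_cases h5 : (5 : Int) ∣ a
        · obtain ⟨k, hk⟩ := h5
          have hk0 : k ≠ 0 := by rintro rfl; simp at hk; exact ha hk
          have hle : k.natAbs ≤ n := by
            have : a.natAbs = 5 * k.natAbs := by rw [hk, Int.natAbs_mul]; rfl
            have : 1 ≤ k.natAbs := by omega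
            omega
          obtain ⟨v, w, u, hu2, hu5, heq⟩ := ih k hle hk0
          exact ⟨v, w + 1, u, hu2, hu5, by rw [hk, heq]; ring⟩
        · exact ⟨0, 0, a, h2, h5, by ring⟩

lemma two_prime_int : Prime (2 : Int) := Int.prime_two
lemma five_prime_int : Prime (5 : Int) := by
  rw [Int.prime_iff_natAbs_prime]; norm_num

lemma not_two_dvd_five_pow_mul (w : Nat) (u : Int) (hu : ¬ (2 ∣ u)) : ¬ (2 ∣ 5 ^ w * u) := by
  intro h
  rcases (two_prime_int.dvd_mul).mp h with h | h
  · have := two_prime_int.dvd_of_dvd_pow h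
    omega
  · exact hu h

lemma not_five_dvd_two_pow_mul (v : Nat) (u : Int) (hu : ¬ (5 ∣ u)) : ¬ (5 ∣ 2 ^ v * u) := by
  intro h
  rcases (five_prime_int.dvd_mul).mp h with h | h
  · have := five_prime_int.dvd_of_dvd_pow h
    omega
  · exact hu h

-- ===== VERDICT (by name: the statement is the Claim_ definition above) =====
theorem fact2_spec : Claim_equal_fact2 := by
  intro a b _ ha
  obtain ⟨v, w, u, hu2, hu5, heq⟩ := decomp a.natAbs a le_rfl ha
  have hu0 : u ≠ 0 := by rintro rfl; exact hu2 (dvd_zero 2)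
  have hna : a.natAbs = 2 ^ v * (5 ^ w * u.natAbs) := by
    rw [heq, Int.natAbs_mul, Int.natAbs_mul, Int.natAbs_pow, Int.natAbs_pow, mul_assoc]; rfl
  have hu1 : 1 ≤ u.natAbs := by omega
  -- enough fuel for both loops
  have hv2 : v < 2 ^ v := Nat.lt_two_pow_self
  have hw5 : w < 5 ^ w := lt_of_lt_of_le Nat.lt_two_pow_self (Nat.pow_le_pow_left (by omega) w)
  have hfa2 : 2 ^ v ≤ a.natAbs := by
    rw [hna]
    exact Nat.le_mul_of_pos_right _ (by positivity)
  have hfa5 : 5 ^ w ≤ a.natAbs := by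
    rw [hna, ← mul_assoc, mul_comm (2 ^ v) (5 ^ w), mul_assoc]
    exact Nat.le_mul_of_pos_right _ (by positivity)
  have hA2 : fact2Loop2 a.natAbs a 0 = (5 ^ w * u, 0 + (v : Int)) := by
    have e : a = 2 ^ v * (5 ^ w * u) := by rw [heq]; ring
    rw [e]
    have hfx : ((2 : Int) ^ v * (5 ^ w * u)).natAbs = a.natAbs := by rw [← e]
    rw [hfx]
    exact loop2_pow a.natAbs v (5 ^ w * u) 0 (not_two_dvd_five_pow_mul w u hu2) (by omega)
  have hq5 : ((5 : Int) ^ w * u).natAbs = 5 ^ w * u.natAbs := by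
    rw [Int.natAbs_mul, Int.natAbs_pow]; rfl
  have hA5 : fact2Loop5 ((5 : Int) ^ w * u).natAbs ((5 : Int) ^ w * u) 0 = (u, 0 + (w : Int)) := by
    have hfuel : w ≤ ((5 : Int) ^ w * u).natAbs := by
      rw [hq5]
      have : 5 ^ w ≤ 5 ^ w * u.natAbs := Nat.le_mul_of_pos_right _ (by omega)
      omega
    exact loop5_pow _ w u 0 hu5 hfuel
  have hB5 : fact2AltLoop5 a.natAbs a 0 = (2 ^ v * u, 0 + (w : Int)) := by
    rw [altLoop5_eq]
    have e : a = 5 ^ w * (2 ^ v * u) := by rw [heq]; ring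
    rw [e]
    have : (5 ^ w * (2 ^ v * u) : Int).natAbs = a.natAbs := by rw [← e]
    rw [this]
    exact loop5_pow a.natAbs w (2 ^ v * u) 0 (not_five_dvd_two_pow_mul v u hu5) (by omega)
  have hband : PySem.Int.band a (-a) = ((2 ^ v : Nat) : Int) :=
    band_lowbit a v (5 ^ w * u) (not_two_dvd_five_pow_mul w u hu2) (by rw [heq]; ring)
  show Spec_fact2 a b (fact2 a b)
  unfold Spec_fact2 fact2 fact2_alt
  simp only [hA2, hA5, hB5, hband, bitLength_two_pow]
  push_cast
  ring_nf
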